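-- pv_equiv track=rewrite | github.com/algoORgoal/big-o-brownies | 프로그래머스/3/84021. 퍼즐 조각 채우기/퍼즐 조각 채우기.py | get_shape_points
-- ===== SOURCE A (Python) =====
-- def extract_blocks_from(table):
--     visited = set()
--
--     # O(n) n = i * j, 1 <= i,j <= 50
--     blocks = []
--     for i in range(0, len(table)):
--         for j in range(0, len(table[i])):
--             point = i, j
--             if point not in visited and table[i][j] == 1:
--                 visited.add(point)
--                 points = dfs(point, table, visited)
--                 block = convert_to_block(points)
--                 blocks.append(block)
--
--     return blocks
--
-- def get_shape_points(table):
--     blocks = extract_blocks_from(table)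
--
--     shape_points = {}
--     for block in blocks:
--         shape = get_shape(block)
--
--         rotated_points = set([ convert_to_points(block) for block in shape ])
--         for points in rotated_points:
--             if points not in shape_points:
--                 shape_points[points] = 0
--             shape_points[points] += 1
--
--     return shape_points
--
-- def dfs(current, table, visited):
--     height, width = len(table), len(table[0])
--
--     x, y = current
--     candidates = (x - 1, y), (x + 1, y), (x, y - 1), (x, y + 1)
--
--     points = [ current ]
--
--     for candidate in candidates:
--         candidate_x, candidate_y = candidate
--         if 0 <= candidate_x < height and 0 <= candidate_y < width and candidate not in visited and table[candidate_x][candidate_y] == 1: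
--             visited.add(candidate)
--             points += dfs(candidate, table, visited)
--
--     return points
--
-- def convert_to_block(points):
--     min_x = min(point[0] for point in points)
--     max_x = max(point[0] for point in points)
--     min_y = min(point[1] for point in points)
--     max_y = max(point[1] for point in points)
--     block = [ [ 0 for j in range(min_y, max_y + 1) ] for i in range(min_x, max_x + 1)]
--
--     for x, y in convert_to_absolute_points(points):
--         block[x][y] = 1
--     return block
--
-- def convert_to_absolute_points(points):
--     min_x = min([ point[0] for point in points ])
--     min_y = min([ point[1] for point in points ])
--     return [ (point_x - min_x, point_y - min_y) for point_x, point_y in points]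
--
-- def convert_to_points(block):
--     points = []
--     for i in range(0, len(block)):
--         for j in range(0, len(block[i])):
--             if block[i][j] == 1:
--                 point = i, j
--                 points.append(point)
--
--     return tuple(sorted(points))
--
-- def get_shape(block1):
--     block2 = rotate(block1)
--     block3 = rotate(block2)
--     block4 = rotate(block3)
--
--     return block1, block2, block3, block4
--
-- def rotate(block):
--     height = len(block)
--     width = len(block[0])
--
--     rotated_block = [ [ 0 for j in range(0, height) ]  for i in range(0, width) ]
--     for i in range(0, height):
--         for j in range(0, width):
--             rotated_block[j][height - 1 - i] = block[i][j]
--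
--     return rotated_block
-- ===== SOURCE B (Python) =====
-- # B: coordinate-set pipeline. Flood fill (same recursive DFS as A) collects each
-- # component's cells; shapes are normalized coordinate tuples rotated directly via
-- # (x, y) -> (y, max_x - x), so no intermediate 0/1 matrices are ever built.
--
-- def dfs(current, table, visited):
--     height, width = len(table), len(table[0])
--     x, y = current
--     candidates = (x - 1, y), (x + 1, y), (x, y - 1), (x, y + 1)
--     points = [current]
--     for candidate in candidates:
--         candidate_x, candidate_y = candidate
--         if 0 <= candidate_x < height and 0 <= candidate_y < width and candidate not in visited and table[candidate_x][candidate_y] == 1: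
--             visited.add(candidate)
--             points += dfs(candidate, table, visited)
--     return points
--
-- def rotate_points(cells):
--     max_x = max(x for x, y in cells)
--     return tuple(sorted((y, max_x - x) for x, y in cells))
--
-- def get_shape_points(table):
--     visited = set()
--     shape_points = {}
--     for i in range(len(table)):
--         for j in range(len(table[i])):
--             if (i, j) not in visited and table[i][j] == 1:
--                 visited.add((i, j))
--                 pts = dfs((i, j), table, visited)
--                 min_x = min(x for x, y in pts)
--                 min_y = min(y for x, y in pts)
--                 cur = tuple(sorted({(x - min_x, y - min_y) for x, y in pts}))
--                 rots = []
--                 for _ in range(4):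
--                     if cur not in rots:
--                         rots.append(cur)
--                     cur = rotate_points(cur)
--                 for r in rots:
--                     shape_points[r] = shape_points.get(r, 0) + 1
--     return shape_points
-- ===== Notes on version B (the rewrite author's own statement) =====
-- stated objective: alternative
-- what changed: B replaces A's matrix pipeline (build a 0/1 block matrix per component, rotate the matrix three times, re-scan each matrix for its points) by a pure coordinate-set pipeline: the flood-filled cells are normalized and rotated directly via (x,y)->(y,max_x-x) on sorted point tuples, and the counting dict is filled in the same scan, so no intermediate matrices or blocks list are built.
import Mathlib
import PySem

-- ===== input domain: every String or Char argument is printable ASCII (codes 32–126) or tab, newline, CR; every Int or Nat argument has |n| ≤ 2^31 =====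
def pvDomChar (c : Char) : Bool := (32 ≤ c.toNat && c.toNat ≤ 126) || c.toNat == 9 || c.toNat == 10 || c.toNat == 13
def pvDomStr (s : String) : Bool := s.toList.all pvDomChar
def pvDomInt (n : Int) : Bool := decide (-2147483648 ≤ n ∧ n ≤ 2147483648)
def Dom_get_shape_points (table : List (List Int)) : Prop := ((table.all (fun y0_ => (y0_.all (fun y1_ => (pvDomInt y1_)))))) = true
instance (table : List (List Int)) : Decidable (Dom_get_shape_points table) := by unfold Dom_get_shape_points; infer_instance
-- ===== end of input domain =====

-- B replaces A's matrix pipeline (per-component 0/1 block matrices, rotated as matrices and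
-- re-scanned for points) by a coordinate-set pipeline rotating normalized point tuples directly;
-- equal return value on Pre_ (A mutates nothing observable).

-- ===== PORT A =====

-- table[x][y] (indices the programs produce are in range and non-negative here)
def pvCell (table : List (List Int)) (x y : Int) : Int :=
  PySem.List.pyGetD (PySem.List.pyGetD table x []) y 0

-- fuel for the recursive flood fill: its nesting depth is bounded by the number of
-- grid cells ever added to `visited`, so this fuel is never exhausted
def pvFuel (table : List (List Int)) : Nat :=
  table.length * (PySem.List.pyGetD table 0 []).length + 2

-- dfs(current, table, visited) — B's Python contains the identical flood fill, so both
-- ports share this transliteration (returns the points list and the updated visited set)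
def pvDfs (table : List (List Int)) :
    Nat → (Int × Int) → PySem.Set (Int × Int) → List (Int × Int) × PySem.Set (Int × Int)
  | 0, current, visited => ([current], visited)
  | fuel+1, current, visited =>
      let height : Int := (table.length : Int)
      let width : Int := ((PySem.List.pyGetD table 0 []).length : Int)
      [(current.1 - 1, current.2), (current.1 + 1, current.2),
       (current.1, current.2 - 1), (current.1, current.2 + 1)].foldl
        (fun (acc : List (Int × Int) × PySem.Set (Int × Int)) cand =>
          if 0 ≤ cand.1 ∧ cand.1 < height ∧ 0 ≤ cand.2 ∧ cand.2 < width ∧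
              PySem.Set.contains acc.2 cand = false ∧ pvCell table cand.1 cand.2 = 1 then
            let r := pvDfs table fuel cand (PySem.Set.add acc.2 cand)
            (acc.1 ++ r.1, r.2)
          else acc)
        ([current], visited)

def pvMin (xs : List Int) : Int := (PySem.List.min? xs (fun v => v)).getD 0
def pvMax (xs : List Int) : Int := (PySem.List.max? xs (fun v => v)).getD 0

-- block[x][y] = v — exact for the in-range non-negative indices these programs produce
def pvSet2d (m : List (List Int)) (x y v : Int) : List (List Int) :=
  if 0 ≤ x ∧ 0 ≤ y then m.set x.toNat ((m.getD x.toNat []).set y.toNat v) else m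

def pvAbsPoints (points : List (Int × Int)) : List (Int × Int) :=
  let min_x := pvMin (points.map (fun p => p.1))
  let min_y := pvMin (points.map (fun p => p.2))
  points.map (fun p => (p.1 - min_x, p.2 - min_y))

def pvConvertToBlock (points : List (Int × Int)) : List (List Int) :=
  let min_x := pvMin (points.map (fun p => p.1))
  let max_x := pvMax (points.map (fun p => p.1))
  let min_y := pvMin (points.map (fun p => p.2))
  let max_y := pvMax (points.map (fun p => p.2))
  let block := (PySem.List.pyRange min_x (max_x + 1)).map
    (fun _ => (PySem.List.pyRange min_y (max_y + 1)).map (fun _ => (0 : Int)))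
  (pvAbsPoints points).foldl (fun b p => pvSet2d b p.1 p.2 1) block

-- the double scan of convert_to_points, before sorting
def pvRawPoints (block : List (List Int)) : List (Int × Int) :=
  (PySem.List.pyRange 0 (block.length : Int)).foldl (fun acc i =>
    (PySem.List.pyRange 0 ((PySem.List.pyGetD block i []).length : Int)).foldl (fun acc j =>
      if PySem.List.pyGetD (PySem.List.pyGetD block i []) j 0 = 1 then acc ++ [(i, j)]
      else acc) acc) []

def pvConvertToPoints (block : List (List Int)) : List (Int × Int) :=
  PySem.List.sorted2 (pvRawPoints block) (fun p => p.1) (fun p => p.2)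

def pvRotate (block : List (List Int)) : List (List Int) :=
  let height : Int := (block.length : Int)
  let width : Int := ((PySem.List.pyGetD block 0 []).length : Int)
  let rotated := (PySem.List.pyRange 0 width).map
    (fun _ => (PySem.List.pyRange 0 height).map (fun _ => (0 : Int)))
  (PySem.List.pyRange 0 height).foldl (fun m i =>
    (PySem.List.pyRange 0 width).foldl (fun m j =>
      pvSet2d m j (height - 1 - i) (PySem.List.pyGetD (PySem.List.pyGetD block i []) j 0)) m)
    rotated

def pvGetShape (block1 : List (List Int)) : List (List (List Int)) :=
  let block2 := pvRotate block1
  let block3 := pvRotate block2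
  let block4 := pvRotate block3
  [block1, block2, block3, block4]

def pvExtractBlocks (table : List (List Int)) : List (List (List Int)) :=
  ((PySem.List.pyRange 0 (table.length : Int)).foldl
    (fun (st : PySem.Set (Int × Int) × List (List (List Int))) i =>
      (PySem.List.pyRange 0 ((PySem.List.pyGetD table i []).length : Int)).foldl
        (fun st j =>
          if PySem.Set.contains st.1 (i, j) = false ∧ pvCell table i j = 1 then
            let r := pvDfs table (pvFuel table) (i, j) (PySem.Set.add st.1 (i, j))
            (r.2, st.2 ++ [pvConvertToBlock r.1])
          else st) st)
    (PySem.Set.empty, [])).2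

def get_shape_points (table : List (List Int)) : List (List (Int × Int) × Int) :=
  let blocks := pvExtractBlocks table
  (blocks.foldl
    (fun (shape_points : PySem.Dict (List (Int × Int)) Int) block =>
      let shape := pvGetShape block
      let rotated_points := PySem.Set.ofList (shape.map pvConvertToPoints)
      List.foldl
        (fun d points =>
          let d1 := if d.contains points = false then d.insert points 0 else d
          d1.insert points (d1.getD points 0 + 1))
        shape_points rotated_points)
    PySem.Dict.empty).items

-- ===== PORT B =====

-- rotate_points: (x, y) -> (y, max_x - x), re-sorted
def pvRotatePoints (cells : List (Int × Int)) : List (Int × Int) :=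
  let max_x := pvMax (cells.map (fun p => p.1))
  PySem.List.sorted2 (cells.map (fun p => (p.2, max_x - p.1))) (fun p => p.1) (fun p => p.2)

def get_shape_points_alt (table : List (List Int)) : List (List (Int × Int) × Int) :=
  ((PySem.List.pyRange 0 (table.length : Int)).foldl
    (fun (st : PySem.Set (Int × Int) × PySem.Dict (List (Int × Int)) Int) i =>
      (PySem.List.pyRange 0 ((PySem.List.pyGetD table i []).length : Int)).foldl
        (fun st j =>
          if PySem.Set.contains st.1 (i, j) = false ∧ pvCell table i j = 1 then
            let r := pvDfs table (pvFuel table) (i, j) (PySem.Set.add st.1 (i, j))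
            let pts := r.1
            let min_x := pvMin (pts.map (fun p => p.1))
            let min_y := pvMin (pts.map (fun p => p.2))
            let cells := PySem.List.sorted2
              (PySem.Set.ofList (pts.map (fun p => (p.1 - min_x, p.2 - min_y))))
              (fun p => p.1) (fun p => p.2)
            let rots := ((PySem.List.pyRange 0 4).foldl
              (fun (rc : List (List (Int × Int)) × List (Int × Int)) _ =>
                ((if rc.1.contains rc.2 = true then rc.1 else rc.1 ++ [rc.2]),
                 pvRotatePoints rc.2))
              ([], cells)).1
            (r.2, rots.foldl (fun d rkey => d.insert rkey (d.getD rkey 0 + 1)) st.2)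
          else st) st)
    (PySem.Set.empty, PySem.Dict.empty)).2.items

-- ===== PRECONDITION & SPEC =====

-- existing table entry equal to 1 at (x, y)
def pvHasOne (table : List (List Int)) (x y : Int) : Bool :=
  decide (0 ≤ x) && decide (0 ≤ y) && decide (x < (table.length : Int)) &&
  decide (y < ((table.getD x.toNat []).length : Int)) &&
  decide ((table.getD x.toNat []).getD y.toNat 0 = 1)

-- Pre_ excludes exactly the tables on which A raises IndexError: those with a missing cell
-- (row x shorter than row 0, column y below row 0's width) orthogonally adjacent to an
-- existing entry equal to 1, which A's width-of-first-row flood fill would then access.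
def Pre_get_shape_points (table : List (List Int)) : Prop :=
  ∀ x < table.length, ∀ y < (table.headD []).length,
    (table.getD x []).length ≤ y →
      pvHasOne table ((x : Int) - 1) (y : Int) = false ∧
      pvHasOne table ((x : Int) + 1) (y : Int) = false ∧
      pvHasOne table (x : Int) ((y : Int) - 1) = false ∧
      pvHasOne table (x : Int) ((y : Int) + 1) = false

instance (table : List (List Int)) : Decidable (Pre_get_shape_points table) := by
  unfold Pre_get_shape_points; infer_instance

def pvWitness_get_shape_points : List (List Int) := [[1, 1, 0], [1, 0, 0], [0, 1, 1]]

def Spec_get_shape_points (table : List (List Int)) (out : List (List (Int × Int) × Int)) : Prop :=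
  out = get_shape_points_alt table
instance (table : List (List Int)) (out : List (List (Int × Int) × Int)) :
    Decidable (Spec_get_shape_points table out) := by unfold Spec_get_shape_points; infer_instance

-- ===== CLAIM (what is proved, stated in full; the proofs are below) =====
def Claim_equal_get_shape_points : Prop :=
  ∀ (table : List (List Int)), Dom_get_shape_points table → Pre_get_shape_points table →
    Spec_get_shape_points table (get_shape_points table)

-- ===== LEMMAS AND PROOFS =====

-- value of cell p of a matrix (0 outside)
def pvCellAt (m : List (List Int)) (p : Int × Int) : Int :=
  (m.getD p.1.toNat []).getD p.2.toNat 0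

-- strict lexicographic order on points (Python's tuple `<`)
def pvLexLt (a b : Int × Int) : Prop := a.1 < b.1 ∨ (a.1 = b.1 ∧ a.2 < b.2)

theorem pvLexLt_iff (a b : Int × Int) : pvLexLt a b ↔ toLex a < toLex b := by
  simp [pvLexLt, Prod.Lex.lt_iff]

theorem pvLexLt_ne {a b : Int × Int} (h : pvLexLt a b) : a ≠ b := by
  rcases h with h | ⟨h1, h2⟩ <;> (intro hh; subst hh; omega)

-- sorted(xs) with Python's tuple order is the unique strictly increasing rearrangement
theorem pv_sorted2_eq {xs ys : List (Int × Int)} (hperm : ys.Perm xs)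
    (hch : ys.Pairwise pvLexLt) :
    PySem.List.sorted2 xs (fun p => p.1) (fun p => p.2) = ys := by
  have hfun : (fun a b : Int × Int =>
      (decide (a.1 < b.1) || (!decide (b.1 < a.1) && decide (a.2 < b.2))))
      = (fun a b : Int × Int => decide (toLex a < toLex b)) := by
    funext a b
    rcases lt_trichotomy a.1 b.1 with h | h | h
    · simp [h, Prod.Lex.lt_iff, not_lt.mpr (le_of_lt h)]
    · simp [h, Prod.Lex.lt_iff]
    · simp [show ¬ a.1 < b.1 by omega, h, Prod.Lex.lt_iff, show a.1 ≠ b.1 by omega]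
  show List.foldl (fun acc x => PySem.List.insertBy
      (fun a b : Int × Int => (decide (a.1 < b.1) || (!decide (b.1 < a.1) && decide (a.2 < b.2))))
      x acc) [] xs = ys
  rw [hfun]
  have hpair : ∀ (l acc : List (Int × Int)),
      acc.Pairwise (fun a b : Int × Int => toLex a ≤ toLex b) →
      (List.foldl (fun acc x => PySem.List.insertBy
        (fun a b : Int × Int => decide (toLex a < toLex b)) x acc) acc l).Pairwise
        (fun a b : Int × Int => toLex a ≤ toLex b) := by
    intro l
    induction l with
    | nil => intro acc h; exact h
    | cons x l ih =>
      intro acc h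
      exact ih _ (PySem.List.insertBy_pairwise_le (fun p : Int × Int => toLex p) x acc h)
  have hres := hpair xs [] (by simp)
  have hperm2 : (List.foldl (fun acc x => PySem.List.insertBy
      (fun a b : Int × Int => decide (toLex a < toLex b)) x acc) [] xs).Perm ys := by
    have := PySem.List.foldl_insertBy_perm
      (fun a b : Int × Int => decide (toLex a < toLex b)) xs []
    simpa using this.trans hperm.symm
  have hys : ys.Pairwise (fun a b : Int × Int => toLex a ≤ toLex b) :=
    hch.imp (fun h => le_of_lt ((pvLexLt_iff _ _).mp h))
  exact List.Perm.eq_of_pairwise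
    (fun a b _ _ h1 h2 => toLex.injective (le_antisymm h1 h2)) hres hys hperm2

-- --- characterization of the raw convert_to_points scan ---

def pvRowPts (i : Int) (row : List Int) : List (Int × Int) :=
  ((List.range row.length).filter (fun j => decide (row.getD j 0 = 1))).map
    (fun (j : Nat) => (i, (j : Int)))

theorem pv_foldl_chunks {gamma : Type} (f : gamma → List (Int × Int))
    (step : List (Int × Int) → gamma → List (Int × Int))
    (hstep : ∀ acc a, step acc a = acc ++ f a) :
    ∀ (l : List gamma) (acc : List (Int × Int)), List.foldl step acc l = acc ++ l.flatMap f := by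
  intro l
  induction l with
  | nil => intro acc; simp
  | cons a l ih => intro acc; rw [List.foldl_cons, hstep, ih, List.flatMap_cons, List.append_assoc]

theorem pv_flatMap_ite {gamma delta : Type} (p : gamma → Bool) (g : gamma → delta) (l : List gamma) :
    l.flatMap (fun k => if p k = true then [g k] else []) = (l.filter p).map g := by
  induction l with
  | nil => rfl
  | cons k l ih =>
    rw [List.flatMap_cons, List.filter_cons]
    by_cases hk : p k = true
    · rw [if_pos hk, if_pos hk, List.map_cons, ih, List.singleton_append]
    · rw [if_neg hk, if_neg hk, ih, List.nil_append]

theorem pv_fold_row (i : Int) (row : List Int) (acc : List (Int × Int)) :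
    (PySem.List.pyRange 0 (row.length : Int)).foldl
      (fun acc j => if PySem.List.pyGetD row j 0 = 1 then acc ++ [(i, j)] else acc) acc
    = acc ++ pvRowPts i row := by
  rw [PySem.List.pyRange_zero_natCast, List.foldl_map]
  simp only [PySem.List.pyGetD_natCast]
  rw [pv_foldl_chunks
    (fun k : Nat => if (decide (row.getD k 0 = 1)) = true then [(i, (k : Int))] else []) _
    (fun acc k => by by_cases h : row.getD k 0 = 1 <;> simp only [List.getD_eq_getElem?_getD] at h <;> simp [h])]
  rw [pv_flatMap_ite]
  rfl

theorem pvRawPoints_eq (M : List (List Int)) :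
    pvRawPoints M = (List.range M.length).flatMap (fun (a : Nat) => pvRowPts (a : Int) (M.getD a [])) := by
  unfold pvRawPoints
  rw [PySem.List.pyRange_zero_natCast, List.foldl_map]
  simp only [PySem.List.pyGetD_natCast]
  rw [pv_foldl_chunks (fun (a : Nat) => pvRowPts (a : Int) (M.getD a [])) _
    (fun acc a => pv_fold_row (a : Int) (M.getD a []) acc)]
  rw [List.nil_append]

theorem pv_mem_rawPoints {M : List (List Int)} {p : Int × Int} :
    p ∈ pvRawPoints M ↔ 0 ≤ p.1 ∧ p.1 < (M.length : Int) ∧ 0 ≤ p.2 ∧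
      p.2 < ((M.getD p.1.toNat []).length : Int) ∧ pvCellAt M p = 1 := by
  rw [pvRawPoints_eq]
  constructor
  · intro hp
    obtain ⟨a, ha, hp⟩ := List.mem_flatMap.mp hp
    obtain ⟨j, hj, rfl⟩ := List.mem_map.mp hp
    obtain ⟨hjr, hj1⟩ := List.mem_filter.mp hj
    have ha' := List.mem_range.mp ha
    have hjl := List.mem_range.mp hjr
    have hj1' : (M.getD a []).getD j 0 = 1 := by simpa using hj1
    refine ⟨Int.natCast_nonneg a, by show ((a : Nat) : Int) < ((M.length : Nat) : Int); exact_mod_cast ha',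
      Int.natCast_nonneg j, ?_, ?_⟩
    · simpa using (show ((j : Nat) : Int) < ((M.getD a []).length : Int) by exact_mod_cast hjl)
    · simpa [pvCellAt] using hj1'
  · rintro ⟨h0, h1, h2, h3, h4⟩
    refine List.mem_flatMap.mpr ⟨p.1.toNat, ?_, ?_⟩
    · exact List.mem_range.mpr (by omega)
    refine List.mem_map.mpr ⟨p.2.toNat, ?_, ?_⟩
    · refine List.mem_filter.mpr ⟨List.mem_range.mpr (by omega), ?_⟩
      simpa [pvCellAt] using h4
    · obtain ⟨p1, p2⟩ := p
      simp only at h0 h2 ⊢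
      rw [Int.toNat_of_nonneg h0, Int.toNat_of_nonneg h2]

theorem pv_pairwise_rawPoints (M : List (List Int)) : (pvRawPoints M).Pairwise pvLexLt := by
  rw [pvRawPoints_eq]
  have hmemfst : ∀ (i : Int) (row : List Int) (q : Int × Int), q ∈ pvRowPts i row → q.1 = i := by
    intro i row q hq
    simp only [pvRowPts, List.mem_map] at hq
    obtain ⟨j, _, rfl⟩ := hq
    rfl
  have h : ∀ l : List Nat, l.Pairwise (· < ·) →
      (l.flatMap (fun a => pvRowPts ((a : Nat) : Int) (M.getD a []))).Pairwise pvLexLt := by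
    intro l
    induction l with
    | nil => intro _; simp
    | cons a l ih =>
      intro hp
      rw [List.flatMap_cons, List.pairwise_append]
      refine ⟨?_, ih hp.of_cons, ?_⟩
      · unfold pvRowPts
        rw [List.pairwise_map]
        refine List.Pairwise.imp ?_ (List.Pairwise.filter _ List.pairwise_lt_range)
        intro x y hxy
        refine Or.inr ⟨rfl, ?_⟩
        show ((x : Nat) : Int) < ((y : Nat) : Int)
        exact_mod_cast hxy
      · intro x hx y hy
        obtain ⟨a', ha', hy'⟩ := List.mem_flatMap.mp hy
        have h1 := hmemfst _ _ _ hx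
        have h2 := hmemfst _ _ _ hy'
        have := List.rel_of_pairwise_cons hp ha'
        exact Or.inl (by rw [h1, h2]; exact_mod_cast this)
  exact h _ List.pairwise_lt_range

theorem pv_nodup_rawPoints (M : List (List Int)) : (pvRawPoints M).Nodup :=
  (pv_pairwise_rawPoints M).imp (fun h => pvLexLt_ne h)

theorem pv_convertToPoints_eq_raw (M : List (List Int)) :
    pvConvertToPoints M = pvRawPoints M :=
  pv_sorted2_eq (List.Perm.refl _) (pv_pairwise_rawPoints M)

-- sorted2 of any list with the same members as pvRawPoints M gives pvRawPoints M
theorem pv_sorted2_eq_raw {M : List (List Int)} {xs : List (Int × Int)} (hnd : xs.Nodup)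
    (hmem : ∀ p, p ∈ xs ↔ p ∈ pvRawPoints M) :
    PySem.List.sorted2 xs (fun p => p.1) (fun p => p.2) = pvRawPoints M :=
  pv_sorted2_eq ((List.perm_ext_iff_of_nodup (pv_nodup_rawPoints M) hnd).mpr
    (fun p => (hmem p).symm)) (pv_pairwise_rawPoints M)

-- --- min / max helpers ---

theorem pv_pvMin_le {xs : List Int} {v : Int} (h : v ∈ xs) : pvMin xs ≤ v := by
  unfold pvMin
  cases hm : PySem.List.min? xs (fun v => v) with
  | none => rw [PySem.List.min?_eq_none_iff] at hm; subst hm; cases h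
  | some m => simpa using PySem.List.min?_isMin hm _ h

theorem pv_le_pvMax {xs : List Int} {v : Int} (h : v ∈ xs) : v ≤ pvMax xs := by
  unfold pvMax
  cases hm : PySem.List.max? xs (fun v => v) with
  | none => rw [PySem.List.max?_eq_none_iff] at hm; subst hm; cases h
  | some m => simpa using PySem.List.max?_isMax hm _ h

theorem pv_pvMin_mem {xs : List Int} (h : xs ≠ []) : pvMin xs ∈ xs := by
  unfold pvMin
  cases hm : PySem.List.min? xs (fun v => v) with
  | none => rw [PySem.List.min?_eq_none_iff] at hm; exact absurd hm h
  | some m => simpa using PySem.List.min?_mem hm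

theorem pv_pvMax_mem {xs : List Int} (h : xs ≠ []) : pvMax xs ∈ xs := by
  unfold pvMax
  cases hm : PySem.List.max? xs (fun v => v) with
  | none => rw [PySem.List.max?_eq_none_iff] at hm; exact absurd hm h
  | some m => simpa using PySem.List.max?_mem hm

theorem pv_pvMax_eq {xs : List Int} {v : Int} (h : v ∈ xs) (hb : ∀ w ∈ xs, w ≤ v) :
    pvMax xs = v :=
  le_antisymm (hb _ (pv_pvMax_mem (by rintro rfl; cases h))) (pv_le_pvMax h)

-- --- 2D assignment lemmas ---

theorem pv_length_set2d (m : List (List Int)) (x y v : Int) :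
    (pvSet2d m x y v).length = m.length := by
  unfold pvSet2d; split <;> simp

theorem pv_rowlen_set2d (m : List (List Int)) (x y v : Int) (i : Nat) :
    ((pvSet2d m x y v).getD i []).length = (m.getD i []).length := by
  unfold pvSet2d
  split
  · by_cases hxi : x.toNat = i
    · subst hxi
      by_cases hlen : x.toNat < m.length
      · simp [List.getD_eq_getElem?_getD, List.getElem?_set, hlen]
      · rw [List.set_eq_of_length_le (by omega)]
    · simp [List.getD_eq_getElem?_getD, List.getElem?_set, hxi]
  · rfl

theorem pv_cellAt_set2d_ne (m : List (List Int)) (x y v : Int) {a b : Int}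
    (ha : 0 ≤ a) (hb : 0 ≤ b) (hne : ¬(x = a ∧ y = b)) :
    pvCellAt (pvSet2d m x y v) (a, b) = pvCellAt m (a, b) := by
  unfold pvSet2d
  split
  · rename_i hg
    unfold pvCellAt
    by_cases hx : x = a
    · subst hx
      have hyb : ¬ y = b := fun hy => hne ⟨rfl, hy⟩
      have hyb' : y.toNat ≠ b.toNat := by omega
      by_cases hlen : x.toNat < m.length
      · simp only [List.getD_eq_getElem?_getD, List.getElem?_set, if_pos rfl]
        simp [hlen, hyb']
      · rw [List.set_eq_of_length_le (by omega)]
    · have hx' : x.toNat ≠ a.toNat := by omega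
      simp [List.getD_eq_getElem?_getD, List.getElem?_set, hx']
  · rfl

theorem pv_cellAt_set2d_eq (m : List (List Int)) {a b : Int} (v : Int)
    (ha : 0 ≤ a) (hb : 0 ≤ b) (h1 : a.toNat < m.length)
    (h2 : b.toNat < (m.getD a.toNat []).length) :
    pvCellAt (pvSet2d m a b v) (a, b) = v := by
  unfold pvSet2d pvCellAt
  rw [if_pos ⟨ha, hb⟩]
  have houter : (m.set a.toNat ((m.getD a.toNat []).set b.toNat v)).getD a.toNat []
      = (m.getD a.toNat []).set b.toNat v := by
    rw [List.getD_eq_getElem?_getD, List.getElem?_set, if_pos rfl, if_pos h1]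
    rfl
  rw [houter, List.getD_eq_getElem?_getD, List.getElem?_set, if_pos rfl, if_pos h2]
  rfl

theorem pv_length_foldl_set2d {gamma : Type} (L : List gamma) (tgt : gamma → Int × Int)
    (val : gamma → Int) (m0 : List (List Int)) :
    (L.foldl (fun m p => pvSet2d m (tgt p).1 (tgt p).2 (val p)) m0).length = m0.length := by
  induction L generalizing m0 with
  | nil => rfl
  | cons q L ih => rw [List.foldl_cons, ih, pv_length_set2d]

theorem pv_rowlen_foldl_set2d {gamma : Type} (L : List gamma) (tgt : gamma → Int × Int)
    (val : gamma → Int) (m0 : List (List Int)) (i : Nat) :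
    ((L.foldl (fun m p => pvSet2d m (tgt p).1 (tgt p).2 (val p)) m0).getD i []).length
      = ((m0.getD i []).length) := by
  induction L generalizing m0 with
  | nil => rfl
  | cons q L ih => rw [List.foldl_cons, ih, pv_rowlen_set2d]

theorem pv_cellAt_foldl_miss {gamma : Type} (L : List gamma) (tgt : gamma → Int × Int)
    (val : gamma → Int) (m0 : List (List Int)) {t : Int × Int}
    (ht1 : 0 ≤ t.1) (ht2 : 0 ≤ t.2) (h : ∀ p ∈ L, tgt p ≠ t) :
    pvCellAt (L.foldl (fun m p => pvSet2d m (tgt p).1 (tgt p).2 (val p)) m0) t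
      = pvCellAt m0 t := by
  induction L generalizing m0 with
  | nil => rfl
  | cons q L ih =>
    rw [List.foldl_cons]
    rw [ih _ (fun p hp => h p (List.mem_cons_of_mem _ hp))]
    obtain ⟨a, b⟩ := t
    refine pv_cellAt_set2d_ne _ _ _ _ ht1 ht2 ?_
    rintro ⟨h1, h2⟩
    exact h q List.mem_cons_self (by rw [← h1, ← h2])

theorem pv_cellAt_foldl_hit {gamma : Type} (L : List gamma) (tgt : gamma → Int × Int)
    (val : gamma → Int) (m0 : List (List Int)) {t : Int × Int} {v : Int}
    (ht1 : 0 ≤ t.1) (ht2 : 0 ≤ t.2) (h1 : t.1.toNat < m0.length)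
    (h2 : t.2.toNat < (m0.getD t.1.toNat []).length)
    (hex : ∃ p ∈ L, tgt p = t) (hval : ∀ p ∈ L, tgt p = t → val p = v) :
    pvCellAt (L.foldl (fun m p => pvSet2d m (tgt p).1 (tgt p).2 (val p)) m0) t = v := by
  induction L generalizing m0 with
  | nil => exact absurd hex (by simp)
  | cons q L ih =>
    rw [List.foldl_cons]
    by_cases hq : ∃ p ∈ L, tgt p = t
    · refine ih _ ?_ ?_ hq (fun p hp he => hval p (List.mem_cons_of_mem _ hp) he)
      · rw [pv_length_set2d]; exact h1
      · rw [pv_rowlen_set2d]; exact h2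
    · have hqt : tgt q = t := by
        rcases hex with ⟨p, hp, hpt⟩
        rcases List.mem_cons.mp hp with rfl | hmem
        · exact hpt
        · exact absurd ⟨p, hmem, hpt⟩ hq
      rw [pv_cellAt_foldl_miss L tgt val _ ht1 ht2 (fun p hp he => hq ⟨p, hp, he⟩)]
      obtain ⟨a, b⟩ := t
      rw [← hval q List.mem_cons_self hqt]
      have h1' : (tgt q).1 = a := by rw [hqt]
      have h2' : (tgt q).2 = b := by rw [hqt]
      rw [h1', h2']
      exact pv_cellAt_set2d_eq m0 (val q) ht1 ht2 h1 h2

theorem pv_cellAt_zeros {r1 r2 : List Int} (p : Int × Int) :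
    pvCellAt (r1.map (fun _ => r2.map (fun _ => (0 : Int)))) p = 0 := by
  unfold pvCellAt
  simp only [List.getD_eq_getElem?_getD, List.getElem?_map]
  cases r1[p.1.toNat]? with
  | none => simp
  | some _ =>
    simp only [Option.map_some, Option.getD_some]
    cases r2[p.2.toNat]? with
    | none => simp
    | some _ => simp

-- --- the block built from a component equals its normalized point set ---

theorem pv_getD_map_const {alpha beta : Type} (l : List alpha) (r : beta) (i : Nat) (d : beta)
    (hi : i < l.length) : (l.map (fun _ => r)).getD i d = r := by
  rw [List.getD_eq_getElem?_getD, List.getElem?_map, List.getElem?_eq_getElem hi]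
  rfl

theorem pv_length_pyRange_one (a b : Int) :
    (PySem.List.pyRange a b).length = (b - a).toNat := by
  have h : ∀ (n : Nat) (a b : Int), (b - a).toNat = n → (PySem.List.pyRange a b).length = n := by
    intro n
    induction n with
    | zero =>
      intro a b hn
      rw [PySem.List.pyRange_one_eq_nil (by omega)]
      rfl
    | succ k ih =>
      intro a b hn
      rw [PySem.List.pyRange_one_cons (by omega)]
      simp [ih (a + 1) b (by omega)]
  exact h _ a b rfl


theorem pv_block_length (pts : List (Int × Int)) :
    (pvConvertToBlock pts).length
      = (pvMax (pts.map (fun p => p.1)) - pvMin (pts.map (fun p => p.1)) + 1).toNat := by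
  simp only [pvConvertToBlock]
  rw [pv_length_foldl_set2d (pvAbsPoints pts) (fun p => p) (fun _ => 1)]
  rw [List.length_map, pv_length_pyRange_one]
  congr 1
  omega

theorem pv_block_rowlen (pts : List (Int × Int)) (i : Nat)
    (hi : i < (pvConvertToBlock pts).length) :
    ((pvConvertToBlock pts).getD i []).length
      = (pvMax (pts.map (fun p => p.2)) - pvMin (pts.map (fun p => p.2)) + 1).toNat := by
  simp only [pvConvertToBlock] at hi ⊢
  rw [pv_rowlen_foldl_set2d (pvAbsPoints pts) (fun p => p) (fun _ => 1)]
  rw [pv_length_foldl_set2d (pvAbsPoints pts) (fun p => p) (fun _ => 1), List.length_map] at hi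
  rw [pv_getD_map_const _ _ i [] hi]
  rw [List.length_map, pv_length_pyRange_one]
  omega

theorem pv_mem_raw_block (pts : List (Int × Int)) (hne : pts ≠ []) (p : Int × Int) :
    p ∈ pvRawPoints (pvConvertToBlock pts) ↔ p ∈ pvAbsPoints pts := by
  have hfs : pts.map (fun p => p.1) ≠ [] := by simpa using hne
  have hss : pts.map (fun p => p.2) ≠ [] := by simpa using hne
  have hx : pvMin (pts.map (fun p => p.1)) ≤ pvMax (pts.map (fun p => p.1)) :=
    pv_pvMin_le (pv_pvMax_mem hfs)
  have hy : pvMin (pts.map (fun p => p.2)) ≤ pvMax (pts.map (fun p => p.2)) :=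
    pv_pvMin_le (pv_pvMax_mem hss)
  have hSb : ∀ q ∈ pvAbsPoints pts, 0 ≤ q.1 ∧
      q.1 ≤ pvMax (pts.map (fun p => p.1)) - pvMin (pts.map (fun p => p.1)) ∧ 0 ≤ q.2 ∧
      q.2 ≤ pvMax (pts.map (fun p => p.2)) - pvMin (pts.map (fun p => p.2)) := by
    intro q hq
    simp only [pvAbsPoints, List.mem_map] at hq
    obtain ⟨r, hr, rfl⟩ := hq
    have h1 := pv_pvMin_le (List.mem_map_of_mem (f := fun p : Int × Int => p.1) hr)
    have h2 := pv_le_pvMax (List.mem_map_of_mem (f := fun p : Int × Int => p.1) hr)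
    have h3 := pv_pvMin_le (List.mem_map_of_mem (f := fun p : Int × Int => p.2) hr)
    have h4 := pv_le_pvMax (List.mem_map_of_mem (f := fun p : Int × Int => p.2) hr)
    simp only at h1 h2 h3 h4 ⊢
    omega
  have hlen := pv_block_length pts
  constructor
  · intro hp
    obtain ⟨h0, h1, h2, h3, h4⟩ := pv_mem_rawPoints.mp hp
    by_contra hnot
    have hmiss : pvCellAt (pvConvertToBlock pts) p = pvCellAt
        ((PySem.List.pyRange (pvMin (pts.map (fun p => p.1)))
          (pvMax (pts.map (fun p => p.1)) + 1)).map
          (fun _ => (PySem.List.pyRange (pvMin (pts.map (fun p => p.2)))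
            (pvMax (pts.map (fun p => p.2)) + 1)).map (fun _ => (0 : Int)))) p := by
      simp only [pvConvertToBlock]
      exact pv_cellAt_foldl_miss (pvAbsPoints pts) (fun q => q) (fun _ => 1) _ h0 h2
        (fun q hq hqe => hnot (hqe ▸ hq))
    rw [hmiss, pv_cellAt_zeros] at h4
    exact absurd h4 (by norm_num)
  · intro hp
    obtain ⟨hb0, hb1, hb2, hb3⟩ := hSb p hp
    have hin1 : p.1.toNat < (pvConvertToBlock pts).length := by omega
    have hrow := pv_block_rowlen pts p.1.toNat hin1
    have hbase1 : p.1.toNat < ((PySem.List.pyRange (pvMin (pts.map (fun p => p.1)))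
        (pvMax (pts.map (fun p => p.1)) + 1)).map
        (fun _ => (PySem.List.pyRange (pvMin (pts.map (fun p => p.2)))
          (pvMax (pts.map (fun p => p.2)) + 1)).map (fun _ => (0 : Int)))).length := by
      rw [List.length_map, pv_length_pyRange_one]
      omega
    have hcell : pvCellAt (pvConvertToBlock pts) p = 1 := by
      simp only [pvConvertToBlock]
      refine pv_cellAt_foldl_hit (pvAbsPoints pts) (fun q => q) (fun _ => 1) _ hb0 hb2
        ?_ ?_ ⟨p, hp, rfl⟩ (fun _ _ _ => rfl)
      · exact hbase1
      · rw [pv_getD_map_const _ _ p.1.toNat [] (by rw [pv_length_pyRange_one]; omega)]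
        rw [List.length_map, pv_length_pyRange_one]
        omega
    refine pv_mem_rawPoints.mpr ⟨hb0, ?_, hb2, ?_, hcell⟩
    · rw [hlen]; omega
    · rw [hrow]; omega

-- nested index loops as one loop over the index pairs
theorem pv_foldl_foldl {gamma delta : Type} (l1 : List gamma) (l2 : List delta)
    (f : List (List Int) → gamma → delta → List (List Int)) (m0 : List (List Int)) :
    l1.foldl (fun m i => l2.foldl (fun m j => f m i j) m) m0
      = (l1.flatMap (fun i => l2.map (fun j => (i, j)))).foldl (fun m p => f m p.1 p.2) m0 := by
  induction l1 generalizing m0 with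
  | nil => rfl
  | cons i l1 ih =>
    rw [List.foldl_cons, ih, List.flatMap_cons, List.foldl_append, List.foldl_map]

-- --- rotation ---

theorem pv_rotate_length (M : List (List Int)) :
    (pvRotate M).length = (M.getD 0 []).length := by
  simp only [pvRotate]
  rw [pv_foldl_foldl]
  rw [pv_length_foldl_set2d _ (fun p : Int × Int => (p.2, (M.length : Int) - 1 - p.1))
    (fun p : Int × Int => PySem.List.pyGetD (PySem.List.pyGetD M p.1 []) p.2 0)]
  rw [List.length_map, pv_length_pyRange_one,
    show PySem.List.pyGetD M 0 [] = M.getD 0 [] from PySem.List.pyGetD_natCast M 0 []]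
  omega

theorem pv_rotate_rowlen (M : List (List Int)) (i : Nat) (hi : i < (pvRotate M).length) :
    ((pvRotate M).getD i []).length = M.length := by
  simp only [pvRotate] at hi ⊢
  rw [pv_foldl_foldl] at hi ⊢
  rw [pv_rowlen_foldl_set2d _ (fun p : Int × Int => (p.2, (M.length : Int) - 1 - p.1))
    (fun p : Int × Int => PySem.List.pyGetD (PySem.List.pyGetD M p.1 []) p.2 0)]
  rw [pv_length_foldl_set2d _ (fun p : Int × Int => (p.2, (M.length : Int) - 1 - p.1))
    (fun p : Int × Int => PySem.List.pyGetD (PySem.List.pyGetD M p.1 []) p.2 0)] at hi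
  rw [List.length_map] at hi
  rw [pv_getD_map_const _ _ i [] hi]
  rw [List.length_map, pv_length_pyRange_one]
  omega

theorem pv_mem_raw_rotate (M : List (List Int)) (W : Nat)
    (hrect : ∀ row ∈ M, row.length = W) (hW : (M.getD 0 []).length = W) (p : Int × Int) :
    p ∈ pvRawPoints (pvRotate M) ↔
      ∃ q ∈ pvRawPoints M, p = (q.2, (M.length : Int) - 1 - q.1) := by
  have hW' : PySem.List.pyGetD M 0 [] = M.getD 0 [] := PySem.List.pyGetD_natCast M 0 []
  have hmemL : ∀ q : Int × Int,
      q ∈ ((PySem.List.pyRange 0 (M.length : Int)).flatMap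
        (fun i => (PySem.List.pyRange 0 ((PySem.List.pyGetD M 0 []).length : Int)).map
          (fun j => (i, j)))) ↔
      (0 ≤ q.1 ∧ q.1 < (M.length : Int) ∧ 0 ≤ q.2 ∧ q.2 < (W : Int)) := by
    intro q
    rw [hW', hW]
    simp only [List.mem_flatMap, List.mem_map, PySem.List.mem_pyRange_one]
    constructor
    · rintro ⟨i, hi, j, hj, rfl⟩; exact ⟨hi.1, hi.2, hj.1, hj.2⟩
    · rintro ⟨h0, h1, h2, h3⟩; exact ⟨q.1, ⟨h0, h1⟩, q.2, ⟨h2, h3⟩, rfl⟩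
  have hrow : ∀ i : Nat, i < M.length → (M.getD i []).length = W := by
    intro i hi
    rw [List.getD_eq_getElem?_getD, List.getElem?_eq_getElem hi]
    exact hrect _ (List.getElem_mem hi)
  have hrotlen : (pvRotate M).length = W := by rw [pv_rotate_length, hW]
  have hrotrow := pv_rotate_rowlen M
  obtain ⟨p1, p2⟩ := p
  constructor
  · intro hp
    obtain ⟨h0, h1, h2, h3, h4⟩ := pv_mem_rawPoints.mp hp
    simp only at h0 h1 h2 h3 h4
    rw [hrotlen] at h1
    rw [hrotrow p1.toNat (by rw [hrotlen]; omega)] at h3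
    have hcell : pvCellAt (pvRotate M) (p1, p2)
        = PySem.List.pyGetD (PySem.List.pyGetD M ((M.length : Int) - 1 - p2) []) p1 0 := by
      simp only [pvRotate]
      rw [pv_foldl_foldl]
      refine pv_cellAt_foldl_hit _ (fun q : Int × Int => (q.2, (M.length : Int) - 1 - q.1))
        (fun q : Int × Int => PySem.List.pyGetD (PySem.List.pyGetD M q.1 []) q.2 0) _ h0 h2
        ?_ ?_ ?_ ?_
      · rw [List.length_map, pv_length_pyRange_one, hW', hW]; omega
      · rw [pv_getD_map_const _ _ p1.toNat []
          (by rw [pv_length_pyRange_one, hW', hW]; omega)]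
        rw [List.length_map, pv_length_pyRange_one]; omega
      · refine ⟨((M.length : Int) - 1 - p2, p1), (hmemL _).mpr
          ⟨by show (0:Int) ≤ (M.length : Int) - 1 - p2; omega,
           by show (M.length : Int) - 1 - p2 < (M.length : Int); omega, h0,
           by show p1 < (W : Int); omega⟩, ?_⟩
        simp only [Prod.mk.injEq]
        exact ⟨by trivial, by omega⟩
      · rintro ⟨q1, q2⟩ _ hq
        simp only [Prod.mk.injEq] at hq
        obtain ⟨hq1, hq2⟩ := hq
        subst hq1
        have hq3 : q1 = (M.length : Int) - 1 - p2 := by omega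
        rw [hq3]
    rw [hcell] at h4
    refine ⟨((M.length : Int) - 1 - p2, p1), ?_, ?_⟩
    · refine pv_mem_rawPoints.mpr ⟨?_, ?_, ?_, ?_, ?_⟩
      · show (0:Int) ≤ (M.length : Int) - 1 - p2
        omega
      · show (M.length : Int) - 1 - p2 < ((M.length : Nat) : Int)
        omega
      · show (0:Int) ≤ p1
        exact h0
      · show p1 < ((M.getD ((M.length : Int) - 1 - p2).toNat []).length : Int)
        rw [show ((M.length : Int) - 1 - p2).toNat = M.length - 1 - p2.toNat by omega]
        rw [hrow _ (by omega)]
        omega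
      · rw [PySem.List.pyGetD_of_nonneg _ []
            (show (0:Int) ≤ (M.length : Int) - 1 - p2 by omega),
          PySem.List.pyGetD_of_nonneg _ 0 h0] at h4
        show (M.getD ((M.length : Int) - 1 - p2).toNat []).getD p1.toNat 0 = 1
        exact h4
    · simp only [Prod.mk.injEq]
      exact ⟨by trivial, by omega⟩
  · rintro ⟨⟨q1, q2⟩, hq, hpq⟩
    obtain ⟨h0, h1, h2, h3, h4⟩ := pv_mem_rawPoints.mp hq
    simp only at h0 h1 h2 h3 h4
    rw [hpq]
    rw [hrow q1.toNat (by omega)] at h3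
    have hcell : pvCellAt (pvRotate M) (q2, (M.length : Int) - 1 - q1)
        = PySem.List.pyGetD (PySem.List.pyGetD M q1 []) q2 0 := by
      simp only [pvRotate]
      rw [pv_foldl_foldl]
      refine pv_cellAt_foldl_hit _ (fun r : Int × Int => (r.2, (M.length : Int) - 1 - r.1))
        (fun r : Int × Int => PySem.List.pyGetD (PySem.List.pyGetD M r.1 []) r.2 0) _ h2
        (by show (0:Int) ≤ (M.length : Int) - 1 - q1; omega) ?_ ?_ ?_ ?_
      · rw [List.length_map, pv_length_pyRange_one, hW', hW]
        show q2.toNat < W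
        omega
      · rw [pv_getD_map_const _ _ q2.toNat []
          (by rw [pv_length_pyRange_one, hW', hW]; omega)]
        rw [List.length_map, pv_length_pyRange_one]
        show ((M.length : Int) - 1 - q1).toNat < M.length
        omega
      · exact ⟨(q1, q2), (hmemL _).mpr ⟨h0, h1, h2, by omega⟩, rfl⟩
      · rintro ⟨r1, r2⟩ _ hr
        simp only [Prod.mk.injEq] at hr
        obtain ⟨hr1, hr2⟩ := hr
        subst hr1
        have hr3 : r1 = q1 := by omega
        rw [hr3]
    refine pv_mem_rawPoints.mpr ⟨?_, ?_, ?_, ?_, ?_⟩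
    · show (0:Int) ≤ q2
      exact h2
    · show q2 < ((pvRotate M).length : Int)
      rw [hrotlen]; omega
    · show (0:Int) ≤ (M.length : Int) - 1 - q1
      omega
    · show (M.length : Int) - 1 - q1 < (((pvRotate M).getD q2.toNat []).length : Int)
      rw [hrotrow _ (by rw [hrotlen]; omega)]; omega
    · rw [show pvCellAt (pvRotate M) (q2, (M.length : Int) - 1 - q1)
          = PySem.List.pyGetD (PySem.List.pyGetD M q1 []) q2 0 from hcell]
      rw [PySem.List.pyGetD_of_nonneg _ [] h0, PySem.List.pyGetD_of_nonneg _ 0 h2]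
      exact h4

theorem pv_convertToPoints_rotate (M : List (List Int)) (W : Nat)
    (hrect : ∀ row ∈ M, row.length = W) (hW : (M.getD 0 []).length = W)
    (hbot : ∃ b, ((M.length : Int) - 1, b) ∈ pvRawPoints M) :
    pvConvertToPoints (pvRotate M) = pvRotatePoints (pvConvertToPoints M) := by
  have hmax : pvMax ((pvConvertToPoints M).map (fun p => p.1)) = (M.length : Int) - 1 := by
    rw [pv_convertToPoints_eq_raw]
    obtain ⟨b, hb⟩ := hbot
    refine pv_pvMax_eq (List.mem_map.mpr ⟨_, hb, rfl⟩) ?_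
    intro w hw
    obtain ⟨q, hq, rfl⟩ := List.mem_map.mp hw
    have := (pv_mem_rawPoints.mp hq).2.1
    omega
  simp only [pvRotatePoints]
  rw [hmax]
  rw [pv_convertToPoints_eq_raw M, pv_convertToPoints_eq_raw (pvRotate M)]
  refine (pv_sorted2_eq_raw ?_ ?_).symm
  · refine (pv_nodup_rawPoints M).map ?_
    intro a b h
    simp only [Prod.mk.injEq] at h
    obtain ⟨h1, h2⟩ := h
    obtain ⟨a1, a2⟩ := a; obtain ⟨b1, b2⟩ := b
    simp only at h1 h2 ⊢
    have : a1 = b1 := by omega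
    rw [this, h1]
  · intro p
    rw [List.mem_map, pv_mem_raw_rotate M W hrect hW]
    constructor
    · rintro ⟨q, hq, rfl⟩; exact ⟨q, hq, rfl⟩
    · rintro ⟨q, hq, rfl⟩; exact ⟨q, hq, rfl⟩


-- --- per-component pipeline: A's dict update from the block equals B's from the points ---

def pvG (d : PySem.Dict (List (Int × Int)) Int) (block : List (List Int)) :
    PySem.Dict (List (Int × Int)) Int :=
  List.foldl
    (fun d points =>
      let d1 := if d.contains points = false then d.insert points 0 else d
      d1.insert points (d1.getD points 0 + 1))
    d (PySem.Set.ofList ((pvGetShape block).map pvConvertToPoints))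

def pvCellsB (pts : List (Int × Int)) : List (Int × Int) :=
  PySem.List.sorted2
    (PySem.Set.ofList (pts.map (fun p =>
      (p.1 - pvMin (pts.map (fun p => p.1)), p.2 - pvMin (pts.map (fun p => p.2))))))
    (fun p => p.1) (fun p => p.2)

def pvRotsB (pts : List (Int × Int)) : List (List (Int × Int)) :=
  ((PySem.List.pyRange 0 4).foldl
    (fun (rc : List (List (Int × Int)) × List (Int × Int)) _ =>
      ((if rc.1.contains rc.2 = true then rc.1 else rc.1 ++ [rc.2]), pvRotatePoints rc.2))
    ([], pvCellsB pts)).1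

def pvGB (d : PySem.Dict (List (Int × Int)) Int) (pts : List (Int × Int)) :
    PySem.Dict (List (Int × Int)) Int :=
  (pvRotsB pts).foldl (fun d rkey => d.insert rkey (d.getD rkey 0 + 1)) d

theorem pv_dict_step (d : PySem.Dict (List (Int × Int)) Int) (k : List (Int × Int)) :
    (let d1 := if d.contains k = false then d.insert k 0 else d
     d1.insert k (d1.getD k 0 + 1)) = d.insert k (d.getD k 0 + 1) := by
  by_cases hc : d.contains k = false
  · show (if d.contains k = false then d.insert k 0 else d).insert k
      ((if d.contains k = false then d.insert k 0 else d).getD k 0 + 1) = _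
    rw [if_pos hc, PySem.Dict.getD_insert]
    rw [if_pos rfl, PySem.Dict.insert_insert_self, PySem.Dict.getD_of_not_contains d 0 hc]
  · show (if d.contains k = false then d.insert k 0 else d).insert k
      ((if d.contains k = false then d.insert k 0 else d).getD k 0 + 1) = _
    rw [if_neg hc]

theorem pv_component (pts : List (Int × Int)) (hne : pts ≠ [])
    (d : PySem.Dict (List (Int × Int)) Int) :
    pvG d (pvConvertToBlock pts) = pvGB d pts := by
  have hfs : pts.map (fun p => p.1) ≠ [] := by simpa using hne
  have hss : pts.map (fun p => p.2) ≠ [] := by simpa using hne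
  have hx : pvMin (pts.map (fun p => p.1)) ≤ pvMax (pts.map (fun p => p.1)) :=
    pv_pvMin_le (pv_pvMax_mem hfs)
  have hy : pvMin (pts.map (fun p => p.2)) ≤ pvMax (pts.map (fun p => p.2)) :=
    pv_pvMin_le (pv_pvMax_mem hss)
  have hlen1 := pv_block_length pts
  have hlen1pos : 0 < (pvConvertToBlock pts).length := by rw [hlen1]; omega
  have hW1 := pv_block_rowlen pts 0 hlen1pos
  have hW1pos : 0 < ((pvConvertToBlock pts).getD 0 []).length := by rw [hW1]; omega
  have hrect1 : ∀ row ∈ pvConvertToBlock pts,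
      row.length = ((pvConvertToBlock pts).getD 0 []).length := by
    intro row hrow
    obtain ⟨k, hk, rfl⟩ := List.mem_iff_getElem.mp hrow
    have h5 := pv_block_rowlen pts k hk
    rw [List.getD_eq_getElem?_getD, List.getElem?_eq_getElem hk, Option.getD_some] at h5
    rw [h5, hW1]
  -- boundary attainments of the first block
  have habs : ∀ q ∈ pts, (q.1 - pvMin (pts.map (fun p => p.1)),
      q.2 - pvMin (pts.map (fun p => p.2))) ∈ pvAbsPoints pts := by
    intro q hq
    simp only [pvAbsPoints, List.mem_map]
    exact ⟨q, hq, rfl⟩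
  have hbot1 : ∃ b, (((pvConvertToBlock pts).length : Int) - 1, b)
      ∈ pvRawPoints (pvConvertToBlock pts) := by
    obtain ⟨q, hq, hq1⟩ := List.mem_map.mp (pv_pvMax_mem hfs)
    have hq1' : q.1 = pvMax (pts.map (fun p => p.1)) := by simpa using hq1
    refine ⟨q.2 - pvMin (pts.map (fun p => p.2)), ?_⟩
    apply (pv_mem_raw_block pts hne _).mpr
    have he : ((pvConvertToBlock pts).length : Int) - 1
        = pvMax (pts.map (fun p => p.1)) - pvMin (pts.map (fun p => p.1)) := by
      rw [hlen1]; omega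
    rw [he, ← hq1']
    exact habs q hq
  have hcol1 : ∃ a, (a, (((pvConvertToBlock pts).getD 0 []).length : Int) - 1)
      ∈ pvRawPoints (pvConvertToBlock pts) := by
    obtain ⟨q, hq, hq1⟩ := List.mem_map.mp (pv_pvMax_mem hss)
    have hq1' : q.2 = pvMax (pts.map (fun p => p.2)) := by simpa using hq1
    refine ⟨q.1 - pvMin (pts.map (fun p => p.1)), ?_⟩
    apply (pv_mem_raw_block pts hne _).mpr
    have he : (((pvConvertToBlock pts).getD 0 []).length : Int) - 1
        = pvMax (pts.map (fun p => p.2)) - pvMin (pts.map (fun p => p.2)) := by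
      rw [hW1]; omega
    rw [he, ← hq1']
    exact habs q hq
  have htop1 : ∃ b, ((0 : Int), b) ∈ pvRawPoints (pvConvertToBlock pts) := by
    obtain ⟨q, hq, hq1⟩ := List.mem_map.mp (pv_pvMin_mem hfs)
    have hq1' : q.1 = pvMin (pts.map (fun p => p.1)) := by simpa using hq1
    refine ⟨q.2 - pvMin (pts.map (fun p => p.2)), ?_⟩
    apply (pv_mem_raw_block pts hne _).mpr
    have he : (0 : Int) = q.1 - pvMin (pts.map (fun p => p.1)) := by rw [hq1']; ring
    rw [he]
    exact habs q hq
  -- dimensions of the rotated blocks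
  have hlen2 := pv_rotate_length (pvConvertToBlock pts)
  have hlen2pos : 0 < (pvRotate (pvConvertToBlock pts)).length := by rw [hlen2]; exact hW1pos
  have hW2 := pv_rotate_rowlen (pvConvertToBlock pts) 0 hlen2pos
  have hrect2 : ∀ row ∈ pvRotate (pvConvertToBlock pts),
      row.length = ((pvRotate (pvConvertToBlock pts)).getD 0 []).length := by
    intro row hrow
    obtain ⟨k, hk, rfl⟩ := List.mem_iff_getElem.mp hrow
    have h5 := pv_rotate_rowlen (pvConvertToBlock pts) k hk
    rw [List.getD_eq_getElem?_getD, List.getElem?_eq_getElem hk, Option.getD_some] at h5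
    rw [h5, hW2]
  have hlen3 := pv_rotate_length (pvRotate (pvConvertToBlock pts))
  have hlen3pos : 0 < (pvRotate (pvRotate (pvConvertToBlock pts))).length := by
    rw [hlen3, hW2]; exact hlen1pos
  have hW3 := pv_rotate_rowlen (pvRotate (pvConvertToBlock pts)) 0 hlen3pos
  have hrect3 : ∀ row ∈ pvRotate (pvRotate (pvConvertToBlock pts)),
      row.length = ((pvRotate (pvRotate (pvConvertToBlock pts))).getD 0 []).length := by
    intro row hrow
    obtain ⟨k, hk, rfl⟩ := List.mem_iff_getElem.mp hrow
    have h5 := pv_rotate_rowlen (pvRotate (pvConvertToBlock pts)) k hk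
    rw [List.getD_eq_getElem?_getD, List.getElem?_eq_getElem hk, Option.getD_some] at h5
    rw [h5, hW3]
  -- attainments of rotated blocks
  have hbot2 : ∃ b, (((pvRotate (pvConvertToBlock pts)).length : Int) - 1, b)
      ∈ pvRawPoints (pvRotate (pvConvertToBlock pts)) := by
    obtain ⟨a, ha⟩ := hcol1
    refine ⟨((pvConvertToBlock pts).length : Int) - 1 - a, ?_⟩
    apply (pv_mem_raw_rotate (pvConvertToBlock pts) _ hrect1 rfl _).mpr
    refine ⟨(a, (((pvConvertToBlock pts).getD 0 []).length : Int) - 1), ha, ?_⟩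
    rw [hlen2]
  have hcol2 : ∃ a, (a, (((pvRotate (pvConvertToBlock pts)).getD 0 []).length : Int) - 1)
      ∈ pvRawPoints (pvRotate (pvConvertToBlock pts)) := by
    obtain ⟨b, hb⟩ := htop1
    refine ⟨b, ?_⟩
    apply (pv_mem_raw_rotate (pvConvertToBlock pts) _ hrect1 rfl _).mpr
    refine ⟨((0 : Int), b), hb, ?_⟩
    rw [hW2]
    norm_num
  have hbot3 : ∃ b, (((pvRotate (pvRotate (pvConvertToBlock pts))).length : Int) - 1, b)
      ∈ pvRawPoints (pvRotate (pvRotate (pvConvertToBlock pts))) := by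
    obtain ⟨a, ha⟩ := hcol2
    refine ⟨((pvRotate (pvConvertToBlock pts)).length : Int) - 1 - a, ?_⟩
    apply (pv_mem_raw_rotate (pvRotate (pvConvertToBlock pts)) _ hrect2 rfl _).mpr
    refine ⟨(a, (((pvRotate (pvConvertToBlock pts)).getD 0 []).length : Int) - 1), ha, ?_⟩
    rw [hlen3]
  -- the four point lists
  have hc1 : pvCellsB pts = pvConvertToPoints (pvConvertToBlock pts) := by
    rw [pv_convertToPoints_eq_raw]
    refine pv_sorted2_eq_raw (PySem.Set.nodup_ofList _) ?_
    intro p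
    rw [PySem.Set.mem_ofList]
    exact (pv_mem_raw_block pts hne p).symm
  have e2 := pv_convertToPoints_rotate (pvConvertToBlock pts) _ hrect1 rfl hbot1
  have e3 := pv_convertToPoints_rotate (pvRotate (pvConvertToBlock pts)) _ hrect2 rfl hbot2
  have e4 := pv_convertToPoints_rotate (pvRotate (pvRotate (pvConvertToBlock pts))) _ hrect3 rfl hbot3
  have hlist : (pvGetShape (pvConvertToBlock pts)).map pvConvertToPoints
      = [pvCellsB pts, pvRotatePoints (pvCellsB pts),
         pvRotatePoints (pvRotatePoints (pvCellsB pts)),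
         pvRotatePoints (pvRotatePoints (pvRotatePoints (pvCellsB pts)))] := by
    simp only [pvGetShape, List.map_cons, List.map_nil]
    rw [e4, e3, e2, ← hc1]
  have h4 : PySem.List.pyRange 0 4 = [0, 1, 2, 3] := by decide
  have hrots : pvRotsB pts
      = PySem.Set.ofList ((pvGetShape (pvConvertToBlock pts)).map pvConvertToPoints) := by
    rw [hlist, PySem.Set.ofList_eq_foldl]
    simp only [pvRotsB, h4, List.foldl_cons, List.foldl_nil, PySem.Set.add, PySem.Set.contains]
    rfl
  have hstep : (fun (d : PySem.Dict (List (Int × Int)) Int) (points : List (Int × Int)) =>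
      let d1 := if d.contains points = false then d.insert points 0 else d
      d1.insert points (d1.getD points 0 + 1))
      = fun (d : PySem.Dict (List (Int × Int)) Int) (points : List (Int × Int)) =>
          d.insert points (d.getD points 0 + 1) := by
    funext d k
    exact pv_dict_step d k
  unfold pvG pvGB
  rw [← hrots, hstep]

-- --- loop bookkeeping ---

theorem pv_foldl_rel {beta sigma tau : Type} (R : sigma → tau → Prop) (f : sigma → beta → sigma)
    (g : tau → beta → tau) (l : List beta) {s : sigma} {t : tau} (h0 : R s t)
    (h : ∀ s t b, R s t → R (f s b) (g t b)) : R (l.foldl f s) (l.foldl g t) := by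
  induction l generalizing s t with
  | nil => exact h0
  | cons b l ih => exact ih (h _ _ _ h0)

theorem pv_foldl_pres {gamma sigma : Type} (P : sigma → Prop) (f : sigma → gamma → sigma)
    (h : ∀ s c, P s → P (f s c)) : ∀ (l : List gamma) (s : sigma), P s → P (l.foldl f s) := by
  intro l
  induction l with
  | nil => exact fun _ hs => hs
  | cons c l ih => exact fun s hs => ih _ (h s c hs)

theorem pv_dfs_ne_nil (table : List (List Int)) (fuel : Nat) (cur : Int × Int)
    (vis : PySem.Set (Int × Int)) : (pvDfs table fuel cur vis).1 ≠ [] := by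
  cases fuel with
  | zero => simp [pvDfs]
  | succ fuel =>
    show (List.foldl _ ([cur], vis) _).1 ≠ []
    refine pv_foldl_pres
      (fun st : List (Int × Int) × PySem.Set (Int × Int) => st.1 ≠ []) _ ?_ _ _ (by simp)
    intro s c hs
    dsimp only
    split
    · intro hnil
      exact hs (List.append_eq_nil_iff.mp hnil).1
    · exact hs

-- ===== VERDICT (by name: the statement is the Claim_ definition above) =====
theorem get_shape_points_spec : Claim_equal_get_shape_points := by
  unfold Claim_equal_get_shape_points
  intro table _ _
  unfold Spec_get_shape_points
  show get_shape_points table = get_shape_points_alt table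
  unfold get_shape_points get_shape_points_alt pvExtractBlocks
  have main := pv_foldl_rel
    (fun (s : PySem.Set (Int × Int) × List (List (List Int)))
         (t : PySem.Set (Int × Int) × PySem.Dict (List (Int × Int)) Int) =>
       s.1 = t.1 ∧ t.2 = List.foldl pvG PySem.Dict.empty s.2)
    (fun (st : PySem.Set (Int × Int) × List (List (List Int))) i =>
      (PySem.List.pyRange 0 ((PySem.List.pyGetD table i []).length : Int)).foldl
        (fun st j =>
          if PySem.Set.contains st.1 (i, j) = false ∧ pvCell table i j = 1 then
            let r := pvDfs table (pvFuel table) (i, j) (PySem.Set.add st.1 (i, j))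
            (r.2, st.2 ++ [pvConvertToBlock r.1])
          else st) st)
    (fun (st : PySem.Set (Int × Int) × PySem.Dict (List (Int × Int)) Int) i =>
      (PySem.List.pyRange 0 ((PySem.List.pyGetD table i []).length : Int)).foldl
        (fun st j =>
          if PySem.Set.contains st.1 (i, j) = false ∧ pvCell table i j = 1 then
            let r := pvDfs table (pvFuel table) (i, j) (PySem.Set.add st.1 (i, j))
            let pts := r.1
            let min_x := pvMin (pts.map (fun p => p.1))
            let min_y := pvMin (pts.map (fun p => p.2))
            let cells := PySem.List.sorted2
              (PySem.Set.ofList (pts.map (fun p => (p.1 - min_x, p.2 - min_y))))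
              (fun p => p.1) (fun p => p.2)
            let rots := ((PySem.List.pyRange 0 4).foldl
              (fun (rc : List (List (Int × Int)) × List (Int × Int)) _ =>
                ((if rc.1.contains rc.2 = true then rc.1 else rc.1 ++ [rc.2]),
                 pvRotatePoints rc.2))
              ([], cells)).1
            (r.2, rots.foldl (fun d rkey => d.insert rkey (d.getD rkey 0 + 1)) st.2)
          else st) st)
    (PySem.List.pyRange 0 (table.length : Int))
    (s := (PySem.Set.empty, ([] : List (List (List Int)))))
    (t := (PySem.Set.empty, (PySem.Dict.empty : PySem.Dict (List (Int × Int)) Int)))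
    ⟨rfl, rfl⟩
    (by
      intro s t i hR
      refine pv_foldl_rel
        (fun (s : PySem.Set (Int × Int) × List (List (List Int)))
             (t : PySem.Set (Int × Int) × PySem.Dict (List (Int × Int)) Int) =>
          s.1 = t.1 ∧ t.2 = List.foldl pvG PySem.Dict.empty s.2) _ _ _ hR ?_
      intro s t j hR
      obtain ⟨h1, h2⟩ := hR
      by_cases hc : PySem.Set.contains t.1 (i, j) = false ∧ pvCell table i j = 1
      · rw [if_pos (by rw [h1]; exact hc), if_pos hc]
        refine ⟨by rw [h1], ?_⟩
        show pvGB t.2 (pvDfs table (pvFuel table) (i, j) (PySem.Set.add t.1 (i, j))).1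
          = List.foldl pvG PySem.Dict.empty
            (s.2 ++ [pvConvertToBlock (pvDfs table (pvFuel table) (i, j) (PySem.Set.add s.1 (i, j))).1])
        rw [h1, List.foldl_append, List.foldl_cons, List.foldl_nil, ← h2]
        exact (pv_component _ (pv_dfs_ne_nil table _ _ _) t.2).symm
      · rw [if_neg (by rw [h1]; exact hc), if_neg hc]
        exact ⟨h1, h2⟩)
  exact (congrArg PySem.Dict.items main.2.symm)
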